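-- pv_equiv track=rewrite | github.com/kayatsa8/NumericalMethods | LinearProgramming/API.py | validateRequestSchema
-- ===== SOURCE A (Python) =====
-- from typing import Set, List
--
-- def validateRequestSchema(request: dict, schema: Set[str]) -> bool:
--     for field in schema:
--         if field not in request:
--             return False
--
--     for key in request:
--         if key not in schema:
--             return False
--
--     return True
-- ===== SOURCE B (Python) =====
-- def validateRequestSchema(request: dict, schema) -> bool:
--     remaining = set(schema)
--     for key in request:
--         if key not in remaining:
--             return False
--         remaining.discard(key)
--     return len(remaining) == 0
-- ===== Notes on version B (the rewrite author's own statement) =====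
-- stated objective: alternative
-- what changed: Replaces A's two symmetric membership passes over two containers by a single consuming pass: B copies the schema into a working set, crosses off each request key (failing on a miss), and succeeds iff the set is exhausted at the end.
import Mathlib
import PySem

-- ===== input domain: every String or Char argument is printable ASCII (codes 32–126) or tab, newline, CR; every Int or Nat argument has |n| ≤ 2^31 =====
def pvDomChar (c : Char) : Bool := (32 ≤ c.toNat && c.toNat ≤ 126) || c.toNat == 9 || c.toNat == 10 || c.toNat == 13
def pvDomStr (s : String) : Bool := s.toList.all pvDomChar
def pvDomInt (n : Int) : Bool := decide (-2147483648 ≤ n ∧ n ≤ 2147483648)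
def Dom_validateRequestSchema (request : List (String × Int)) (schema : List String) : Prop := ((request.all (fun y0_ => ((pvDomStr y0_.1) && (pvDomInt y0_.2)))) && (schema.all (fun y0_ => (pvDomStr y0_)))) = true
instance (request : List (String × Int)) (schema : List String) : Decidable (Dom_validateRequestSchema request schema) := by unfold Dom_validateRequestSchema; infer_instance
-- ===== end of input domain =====

-- B replaces A's two symmetric membership passes by one consuming pass: copy the schema into a
-- working set, cross off each request key (failing on a miss), succeed iff the set ends empty.

-- ===== PORT A =====
-- first loop: return False as soon as a schema field is missing from request; second loop:
-- return False as soon as a request key is missing from schema; else True.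
def validateRequestSchema (request : List (String × Int)) (schema : List String) : Bool :=
  if schema.all (fun field => request.any (fun kv => kv.1 == field)) then
    request.all (fun kv => schema.contains kv.1)
  else
    false

-- ===== PORT B =====
-- Source B's for-loop over request with the mutable 'remaining' set, as structural recursion
def vrsConsume (request : List (String × Int)) (remaining : PySem.Set String) : Bool :=
  match request with
  | [] => remaining.length == 0
  | (k, _) :: rest =>
    if PySem.Set.contains remaining k then vrsConsume rest (PySem.Set.discard remaining k)
    else false

def validateRequestSchema_alt (request : List (String × Int)) (schema : List String) : Bool :=
  vrsConsume request (PySem.Set.ofList schema)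

-- ===== PRECONDITION & SPEC =====
-- Pre_ states the invariant the Python types guarantee (request is a dict, schema a set):
-- no duplicate request keys and no duplicate schema elements. It excludes no Python input.
def Pre_validateRequestSchema (request : List (String × Int)) (schema : List String) : Prop :=
  (request.map Prod.fst).Nodup ∧ schema.Nodup
instance (request : List (String × Int)) (schema : List String) : Decidable (Pre_validateRequestSchema request schema) := by unfold Pre_validateRequestSchema; infer_instance
def pvWitness_validateRequestSchema : (List (String × Int)) × List String := ([("a", 1), ("b", 2)], ["b", "a"])
def Spec_validateRequestSchema (request : List (String × Int)) (schema : List String) (out : Bool) : Prop := out = validateRequestSchema_alt request schema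
instance (request : List (String × Int)) (schema : List String) (out : Bool) : Decidable (Spec_validateRequestSchema request schema out) := by unfold Spec_validateRequestSchema; infer_instance

-- ===== CLAIM (what is proved, stated in full; the proofs are below) =====
def Claim_equal_validateRequestSchema : Prop := ∀ (request : List (String × Int)) (schema : List String), Dom_validateRequestSchema request schema → Pre_validateRequestSchema request schema → Spec_validateRequestSchema request schema (validateRequestSchema request schema)

-- ===== LEMMAS AND PROOFS =====

-- On a duplicate-free set, Python's discard is Mathlib's erase.
theorem discard_eq_erase (rem : PySem.Set String) (h : rem.Nodup) (k : String) :
    PySem.Set.discard rem k = rem.erase k := by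
  rw [h.erase_eq_filter k]
  unfold PySem.Set.discard
  apply List.filter_congr
  intro x _
  simp [bne]

-- The consuming loop succeeds exactly when the request keys are a permutation of 'remaining'.
theorem vrsConsume_iff_perm (request : List (String × Int)) (remaining : PySem.Set String)
    (h : remaining.Nodup) :
    vrsConsume request remaining = true ↔ (request.map Prod.fst).Perm remaining := by
  induction request generalizing remaining with
  | nil =>
    constructor
    · intro hb
      have : remaining.length = 0 := by simpa [vrsConsume] using hb
      rw [List.length_eq_zero_iff.mp this]; simp
    · intro hp
      have : remaining = [] := (List.nil_perm).mp (by simpa using hp)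
      simp [vrsConsume, this]
  | cons kv rest ih =>
    obtain ⟨k, v⟩ := kv
    by_cases hk : k ∈ remaining
    · rw [List.map_cons, List.cons_perm_iff_perm_erase]
      have hnd : (PySem.Set.discard remaining k).Nodup := PySem.Set.nodup_discard remaining k h
      show (if PySem.Set.contains remaining k then vrsConsume rest (PySem.Set.discard remaining k) else false) = true ↔ _
      rw [if_pos ((PySem.Set.contains_iff remaining k).mpr hk)]
      rw [ih _ hnd, discard_eq_erase remaining h k]
      exact ⟨fun hp => ⟨hk, hp⟩, fun hp => hp.2⟩
    · show (if PySem.Set.contains remaining k then vrsConsume rest (PySem.Set.discard remaining k) else false) = true ↔ _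
      rw [if_neg (fun hh => hk ((PySem.Set.contains_iff remaining k).mp hh))]
      constructor
      · intro hb; exact absurd hb Bool.false_ne_true
      · intro hp; exact absurd (hp.mem_iff.mp (by simp)) hk

-- With nodup keys on both sides, A's mutual containment coincides with B's consuming pass.
theorem validateRequestSchema_eq_alt (request : List (String × Int)) (schema : List String)
    (hreq : (request.map Prod.fst).Nodup) (hsch : schema.Nodup) :
    validateRequestSchema request schema = validateRequestSchema_alt request schema := by
  rw [Bool.eq_iff_iff]
  unfold validateRequestSchema validateRequestSchema_alt
  rw [show PySem.Set.ofList schema = schema from PySem.Set.ofList_eq_self_of_nodup schema hsch, vrsConsume_iff_perm request schema hsch]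
  constructor
  · intro hA
    split_ifs at hA with hc
    · simp only [List.all_eq_true] at hA hc
      have hsub1 : schema.Subperm (request.map Prod.fst) := by
        refine List.subperm_of_subset hsch ?_
        intro f hf
        have := hc f hf
        simp only [List.any_eq_true, beq_iff_eq] at this
        obtain ⟨kv, hkv, hke⟩ := this
        exact List.mem_map.mpr ⟨kv, hkv, hke⟩
      have hsub2 : (request.map Prod.fst).Subperm schema := by
        refine List.subperm_of_subset hreq ?_
        intro x hx
        obtain ⟨kv, hkv, rfl⟩ := List.mem_map.mp hx
        simpa [List.contains_iff_mem] using hA kv hkv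
      exact hsub2.antisymm hsub1
  · intro hperm
    have hc : schema.all (fun field => request.any (fun kv => kv.1 == field)) = true := by
      simp only [List.all_eq_true, List.any_eq_true, beq_iff_eq]
      intro f hf
      have : f ∈ request.map Prod.fst := hperm.mem_iff.mpr hf
      obtain ⟨kv, hkv, rfl⟩ := List.mem_map.mp this
      exact ⟨kv, hkv, rfl⟩
    rw [if_pos hc]
    simp only [List.all_eq_true]
    intro kv hkv
    simpa [List.contains_iff_mem] using hperm.mem_iff.mp (List.mem_map.mpr ⟨kv, hkv, rfl⟩)

-- ===== VERDICT (by name: the statement is the Claim_ definition above) =====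
theorem validateRequestSchema_spec : Claim_equal_validateRequestSchema := by
  intro request schema _ hpre
  unfold Spec_validateRequestSchema
  exact validateRequestSchema_eq_alt request schema hpre.1 hpre.2
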